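-- pv_equiv track=rewrite | github.com/Herrieson/nanoclaw | nanoclaw/runners/docker_runner.py | _parse_exit_code
-- ===== SOURCE A (Python) =====
-- def _parse_exit_code(stdout: str) -> int | None:
--     lines = [line.strip() for line in stdout.splitlines() if line.strip()]
--     if not lines:
--         return None
--     try:
--         return int(lines[-1])
--     except ValueError:
--         return None
-- ===== SOURCE B (Python) =====
-- def _parse_exit_code(stdout: str) -> int | None:
--     for line in reversed(stdout.splitlines()):
--         s = line.strip()
--         if s:
--             try:
--                 return int(s)
--             except ValueError:
--                 return None
--     return None
-- ===== Notes on version B (the rewrite author's own statement) =====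
-- stated objective: alternative
-- what changed: Replaces the full forward filter-strip-into-a-list plus last-index with a backward short-circuiting scan over reversed lines that returns on the first non-empty stripped line, building no intermediate list.
import Mathlib
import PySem

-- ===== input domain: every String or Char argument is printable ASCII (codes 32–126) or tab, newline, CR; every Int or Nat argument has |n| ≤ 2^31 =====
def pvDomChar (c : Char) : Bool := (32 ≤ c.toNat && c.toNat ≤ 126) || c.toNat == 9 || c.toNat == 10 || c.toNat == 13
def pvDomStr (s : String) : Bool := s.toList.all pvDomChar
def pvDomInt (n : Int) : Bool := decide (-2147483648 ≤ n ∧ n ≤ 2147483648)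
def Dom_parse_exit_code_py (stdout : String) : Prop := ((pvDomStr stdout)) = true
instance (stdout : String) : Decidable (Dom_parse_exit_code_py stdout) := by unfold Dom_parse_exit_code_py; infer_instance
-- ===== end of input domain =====

-- B replaces the forward filter-into-a-list plus last-index by a backward short-circuiting scan (alternative decomposition, same cost).

-- ===== PORT A =====
def parse_exit_code_py (stdout : String) : Option Int :=
  let lines := ((PySem.Str.splitlines stdout).filter
      (fun line => PySem.Str.strip line != "")).map PySem.Str.strip
  if lines = [] then none
  else
    match PySem.List.pyGet? lines (-1) with
    | none => none
    | some s => PySem.Int.ofStr? s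

-- ===== PORT B =====
-- backward scan: first non-empty stripped line decides the result
def pvScanBack : List String → Option Int
  | [] => none
  | line :: rest =>
    let s := PySem.Str.strip line
    if s = "" then pvScanBack rest else PySem.Int.ofStr? s

def parse_exit_code_py_alt (stdout : String) : Option Int :=
  pvScanBack (PySem.Str.splitlines stdout).reverse

-- ===== PRECONDITION & SPEC =====
def Spec_parse_exit_code_py (stdout : String) (out : Option Int) : Prop := out = parse_exit_code_py_alt stdout
instance (stdout : String) (out : Option Int) : Decidable (Spec_parse_exit_code_py stdout out) := by unfold Spec_parse_exit_code_py; infer_instance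

-- ===== CLAIM (what is proved, stated in full; the proofs are below) =====
def Claim_equal_parse_exit_code_py : Prop := ∀ (stdout : String), Dom_parse_exit_code_py stdout → Spec_parse_exit_code_py stdout (parse_exit_code_py stdout)

-- ===== LEMMAS AND PROOFS =====

-- A's computation expressed on an arbitrary list of lines
def pvACore (ls : List String) : Option Int :=
  let lines := (ls.filter (fun line => PySem.Str.strip line != "")).map PySem.Str.strip
  if lines = [] then none
  else
    match PySem.List.pyGet? lines (-1) with
    | none => none
    | some s => PySem.Int.ofStr? s

theorem pvScanBack_eq_core (ms : List String) : pvScanBack ms = pvACore ms.reverse := by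
  induction ms with
  | nil => rfl
  | cons y t ih =>
    simp only [pvScanBack, List.reverse_cons]
    by_cases h : PySem.Str.strip y = ""
    · simp only [h, if_true]
      rw [ih]
      unfold pvACore
      simp [List.filter_append, h]
    · simp only [h, if_false]
      unfold pvACore
      simp only [List.filter_append, List.map_append]
      have hy : (List.filter (fun line => PySem.Str.strip line != "") [y]) = [y] := by
        simp [h]
      rw [hy]
      simp [PySem.List.pyGet?_neg_one_append_singleton]

theorem pvScanBack_eq (ls : List String) : pvScanBack ls.reverse = pvACore ls := by
  rw [pvScanBack_eq_core, List.reverse_reverse]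

-- ===== VERDICT (by name: the statement is the Claim_ definition above) =====
theorem parse_exit_code_py_spec : Claim_equal_parse_exit_code_py := by
  intro stdout _
  unfold Spec_parse_exit_code_py parse_exit_code_py parse_exit_code_py_alt
  rw [pvScanBack_eq]
  rfl
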